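-- pv_equiv track=rewrite | github.com/Tanorbessane/speed-dating-planner | src/swap_evaluation.py | _count_table_repeats
-- ===== SOURCE A (Python) =====
-- from typing import Set, Tuple
--
-- def _count_table_repeats(table: Set[int], met_pairs: Set[Tuple[int, int]]) -> int:
--     """Compte le nombre de répétitions dans une table (fonction auxiliaire pure).
--
--     Une paire est considérée comme répétition si elle apparaît dans met_pairs
--     (c'est-à-dire qu'elle s'est déjà rencontrée auparavant).
--
--     Args:
--         table: Ensemble des participants à la table
--         met_pairs: Historique complet des rencontres
--
--     Returns:
--         Nombre de répétitions dans cette table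
--
--     Complexity:
--         Time: O(x²) où x = taille table (génération paires)
--         Space: O(1)
--
--     Note:
--         Fonction auxiliaire privée, pure (pas d'effets de bord).
--     """
--     repeats = 0
--     participants = list(table)
--
--     for i in range(len(participants)):
--         for j in range(i + 1, len(participants)):
--             p1, p2 = participants[i], participants[j]
--             pair = (min(p1, p2), max(p1, p2))
--
--             # Si cette paire s'est déjà rencontrée, c'est une répétition
--             if pair in met_pairs:
--                 repeats += 1
--
--     return repeats
-- ===== SOURCE B (Python) =====
-- def _count_table_repeats(table, met_pairs):
--     """One pass over the history: count canonical pairs (a < b) with both ends at the table."""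
--     return sum(1 for (a, b) in met_pairs if a < b and a in table and b in table)
-- ===== Notes on version B (the rewrite author's own statement) =====
-- stated objective: faster
-- what changed: Instead of enumerating all O(x^2) participant pairs of the table and testing each against the history, B makes a single pass over met_pairs and counts the entries (a, b) with a < b (the canonical form A builds with min/max) whose both ends sit at the table.
import Mathlib
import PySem

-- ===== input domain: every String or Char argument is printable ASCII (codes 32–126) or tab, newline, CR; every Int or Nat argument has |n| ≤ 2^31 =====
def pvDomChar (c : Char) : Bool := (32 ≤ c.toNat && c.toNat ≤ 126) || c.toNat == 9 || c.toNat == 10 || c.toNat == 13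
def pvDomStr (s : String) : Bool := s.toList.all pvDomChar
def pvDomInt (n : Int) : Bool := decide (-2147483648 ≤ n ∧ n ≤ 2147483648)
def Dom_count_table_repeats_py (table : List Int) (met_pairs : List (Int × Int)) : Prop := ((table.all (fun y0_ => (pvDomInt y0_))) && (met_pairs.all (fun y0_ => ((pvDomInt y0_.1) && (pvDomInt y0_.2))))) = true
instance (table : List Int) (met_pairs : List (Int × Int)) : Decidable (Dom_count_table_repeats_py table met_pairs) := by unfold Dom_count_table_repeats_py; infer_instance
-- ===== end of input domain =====

-- B replaces A's O(x²) enumeration of table pairs by one counting pass over the history (objective: faster).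

-- ===== PORT A =====
def count_table_repeats_py (table : List Int) (met_pairs : List (Int × Int)) : Int :=
  let participants := table
  (PySem.List.pyRange 0 (participants.length : Int) 1).foldl (fun repeats i =>
    (PySem.List.pyRange (i + 1) (participants.length : Int) 1).foldl (fun repeats j =>
      let p1 := PySem.List.pyGetD participants i 0
      let p2 := PySem.List.pyGetD participants j 0
      let pair := (min p1 p2, max p1 p2)
      if pair ∈ met_pairs then repeats + 1 else repeats) repeats) 0

-- ===== PORT B =====
def count_table_repeats_py_alt (table : List Int) (met_pairs : List (Int × Int)) : Int :=
  (met_pairs.countP (fun p => decide (p.1 < p.2) && decide (p.1 ∈ table) && decide (p.2 ∈ table)) : Int)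

-- ===== PRECONDITION & SPEC =====
-- Pre_ is the representation invariant of the Python arguments: both are sets, so their
-- List encodings hold distinct elements; on lists with duplicates neither behaviour
-- corresponds to a Python input of the declared type.
def Pre_count_table_repeats_py (table : List Int) (met_pairs : List (Int × Int)) : Prop :=
  table.Nodup ∧ met_pairs.Nodup
instance (table : List Int) (met_pairs : List (Int × Int)) : Decidable (Pre_count_table_repeats_py table met_pairs) := by unfold Pre_count_table_repeats_py; infer_instance
def pvWitness_count_table_repeats_py : List Int × (List (Int × Int)) := ([1, 2, 3], [(1, 2), (2, 3)])

def Spec_count_table_repeats_py (table : List Int) (met_pairs : List (Int × Int)) (out : Int) : Prop := out = count_table_repeats_py_alt table met_pairs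
instance (table : List Int) (met_pairs : List (Int × Int)) (out : Int) : Decidable (Spec_count_table_repeats_py table met_pairs out) := by unfold Spec_count_table_repeats_py; infer_instance

-- ===== CLAIM (what is proved, stated in full; the proofs are below) =====
def Claim_equal_count_table_repeats_py : Prop := ∀ (table : List Int) (met_pairs : List (Int × Int)), Dom_count_table_repeats_py table met_pairs → Pre_count_table_repeats_py table met_pairs → Spec_count_table_repeats_py table met_pairs (count_table_repeats_py table met_pairs)

-- ===== LEMMAS AND PROOFS =====

-- structural reading of A's double loop, used only by the proofs below
def pairCount (met_pairs : List (Int × Int)) : List Int → Int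
  | [] => 0
  | x :: xs => (xs.countP (fun y => decide ((min x y, max x y) ∈ met_pairs)) : Int) + pairCount met_pairs xs

theorem sum_form (mp : List (Int × Int)) (t : List Int) :
    (((List.range t.length).map (fun k =>
      ((t.drop (k + 1)).countP (fun y => decide ((min (t.getD k 0) y, max (t.getD k 0) y) ∈ mp)) : Int))).sum)
    = pairCount mp t := by
  induction t with
  | nil => simp [pairCount]
  | cons x xs ih =>
    rw [List.length_cons, List.range_succ_eq_map, List.map_cons, List.map_map, List.sum_cons]
    simp only [Function.comp_def, Nat.succ_eq_add_one, List.getD_cons_succ, List.drop_succ_cons,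
      List.getD_cons_zero, List.drop_zero]
    rw [ih, pairCount]

theorem A_eq_pairCount (t : List Int) (mp : List (Int × Int)) :
    count_table_repeats_py t mp = pairCount mp t := by
  unfold count_table_repeats_py
  have hinner : ∀ (repeats i : Int), 0 ≤ i →
      (PySem.List.pyRange (i + 1) (t.length : Int) 1).foldl (fun repeats j =>
        if (min (PySem.List.pyGetD t i 0) (PySem.List.pyGetD t j 0),
            max (PySem.List.pyGetD t i 0) (PySem.List.pyGetD t j 0)) ∈ mp
        then repeats + 1 else repeats) repeats
      = repeats + ((t.drop (i + 1).toNat).countP (fun y =>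
          decide ((min (PySem.List.pyGetD t i 0) y, max (PySem.List.pyGetD t i 0) y) ∈ mp)) : Int) := by
    intro repeats i hi
    rw [PySem.List.foldl_pyRange_pyGetD' t 0
      (fun acc y => if (min (PySem.List.pyGetD t i 0) y, max (PySem.List.pyGetD t i 0) y) ∈ mp
        then acc + 1 else acc) repeats (show (0:Int) ≤ i + 1 by omega)]
    rw [PySem.List.foldl_ite_add_one]
  have houter := PySem.List.foldl_congr_mem'
    (PySem.List.pyRange 0 (t.length : Int) 1)
    (fun (repeats i : Int) =>
      (PySem.List.pyRange (i + 1) (t.length : Int) 1).foldl (fun repeats j =>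
        if (min (PySem.List.pyGetD t i 0) (PySem.List.pyGetD t j 0),
            max (PySem.List.pyGetD t i 0) (PySem.List.pyGetD t j 0)) ∈ mp
        then repeats + 1 else repeats) repeats)
    (fun (repeats i : Int) =>
      repeats + ((t.drop (i + 1).toNat).countP (fun y =>
        decide ((min (PySem.List.pyGetD t i 0) y, max (PySem.List.pyGetD t i 0) y) ∈ mp)) : Int))
    0
    (fun i hi acc => hinner acc i ((PySem.List.mem_pyRange_one).1 hi).1)
  rw [houter, PySem.List.foldl_add, PySem.List.pyRange_one 0 (t.length : Int)]
  simp only [Int.sub_zero, Int.toNat_natCast, List.map_map, Function.comp_def, Int.zero_add]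
  rw [← sum_form mp t]
  congr 1
  apply List.map_congr_left
  intro k hk
  have h1 : ((k : Int) + 1).toNat = k + 1 := by omega
  rw [h1, PySem.List.pyGetD_natCast]

theorem countP_or_disjoint {α : Type} (l : List α) (p q : α → Bool)
    (h : ∀ a ∈ l, ¬(p a = true ∧ q a = true)) :
    l.countP (fun a => p a || q a) = l.countP p + l.countP q := by
  induction l with
  | nil => simp
  | cons x xs ih =>
    have hx := h x (by simp)
    have ih' := ih (fun a ha => h a (by simp [ha]))
    by_cases hp : p x = true <;> by_cases hq : q x = true <;>
      simp_all [List.countP_cons] <;> omega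

theorem countP_mem_comm {α : Type} [DecidableEq α] (l1 l2 : List α)
    (h1 : l1.Nodup) (h2 : l2.Nodup) :
    l1.countP (fun a => decide (a ∈ l2)) = l2.countP (fun a => decide (a ∈ l1)) := by
  rw [List.countP_eq_length_filter, List.countP_eq_length_filter]
  have e1 : (l1.filter (fun a => decide (a ∈ l2))).length = (l1.toFinset ∩ l2.toFinset).card := by
    rw [← List.toFinset_card_of_nodup (List.Nodup.filter _ h1)]
    congr 1
    ext a
    simp
  have e2 : (l2.filter (fun a => decide (a ∈ l1))).length = (l2.toFinset ∩ l1.toFinset).card := by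
    rw [← List.toFinset_card_of_nodup (List.Nodup.filter _ h2)]
    congr 1
    ext a
    simp
  rw [e1, e2, Finset.inter_comm]

theorem pairCount_eq_alt (t : List Int) (mp : List (Int × Int))
    (ht : t.Nodup) (hmp : mp.Nodup) :
    pairCount mp t = count_table_repeats_py_alt t mp := by
  unfold count_table_repeats_py_alt
  induction t with
  | nil => simp [pairCount]
  | cons x xs ih =>
    have hx : x ∉ xs := (List.nodup_cons.1 ht).1
    have hxs : xs.Nodup := (List.nodup_cons.1 ht).2
    have key : mp.countP (fun p => decide (p.1 < p.2) && decide (p.1 ∈ x :: xs) && decide (p.2 ∈ x :: xs))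
        = mp.countP (fun p => decide (p.1 < p.2) && decide (p.1 ∈ xs) && decide (p.2 ∈ xs))
          + xs.countP (fun y => decide ((min x y, max x y) ∈ mp)) := by
      have hsplit : ∀ p : Int × Int,
          (decide (p.1 < p.2) && decide (p.1 ∈ x :: xs) && decide (p.2 ∈ x :: xs))
          = ((decide (p.1 < p.2) && decide (p.1 ∈ xs) && decide (p.2 ∈ xs))
             || decide (p ∈ xs.map (fun y => (min x y, max x y)))) := by
        rintro ⟨a, b⟩
        rw [Bool.eq_iff_iff]
        simp only [Bool.or_eq_true, Bool.and_eq_true, decide_eq_true_eq, List.mem_cons,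
          List.mem_map]
        constructor
        · rintro ⟨⟨hlt, h1 | h1⟩, h2 | h2⟩
          · omega
          · have hxb : x < b := by omega
            exact Or.inr ⟨b, h2, by simp [min_eq_left hxb.le, max_eq_right hxb.le, h1]⟩
          · have hax : a < x := by omega
            exact Or.inr ⟨a, h1, by simp [min_eq_right hax.le, max_eq_left hax.le, h2]⟩
          · exact Or.inl ⟨⟨hlt, h1⟩, h2⟩
        · rintro (⟨⟨hlt, h1⟩, h2⟩ | ⟨y, hy, hp⟩)
          · exact ⟨⟨hlt, Or.inr h1⟩, Or.inr h2⟩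
          · have hne : x ≠ y := fun h => hx (h ▸ hy)
            have hp1 : min x y = a := congrArg Prod.fst hp
            have hp2 : max x y = b := congrArg Prod.snd hp
            rcases lt_trichotomy x y with hlt | heq | hlt
            · have ha : a = x := by rw [← hp1, min_eq_left hlt.le]
              have hb : b = y := by rw [← hp2, max_eq_right hlt.le]
              exact ⟨⟨by omega, Or.inl ha⟩, Or.inr (by rw [hb]; exact hy)⟩
            · exact absurd heq hne
            · have ha : a = y := by rw [← hp1, min_eq_right hlt.le]
              have hb : b = x := by rw [← hp2, max_eq_left hlt.le]
              exact ⟨⟨by omega, Or.inr (by rw [ha]; exact hy)⟩, Or.inl hb⟩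
      rw [List.countP_congr (fun p _ => by rw [hsplit p])]
      have hdisj : ∀ p ∈ mp, ¬((decide (p.1 < p.2) && decide (p.1 ∈ xs) && decide (p.2 ∈ xs)) = true
          ∧ (decide (p ∈ xs.map (fun y => (min x y, max x y)))) = true) := by
        rintro p _ ⟨ha, hb⟩
        simp only [Bool.and_eq_true, decide_eq_true_eq, List.mem_map] at ha hb
        rcases hb with ⟨y, hy, hp⟩
        rcases le_total x y with h | h
        · have hpx : p.1 = x := by rw [← hp]; simp [min_eq_left h]
          exact hx (hpx ▸ ha.1.2)
        · have hpx : p.2 = x := by rw [← hp]; simp [max_eq_left h]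
          exact hx (hpx ▸ ha.2)
      rw [countP_or_disjoint mp _ _ hdisj]
      congr 1
      have hnodup : (xs.map (fun y => (min x y, max x y))).Nodup := by
        refine List.Nodup.map_on ?_ hxs
        intro y1 h1 y2 h2 heq
        have s1 : min x y1 + max x y1 = x + y1 := min_add_max x y1
        have s2 : min x y2 + max x y2 = x + y2 := min_add_max x y2
        have e1 : min x y1 = min x y2 := congrArg Prod.fst heq
        have e2 : max x y1 = max x y2 := congrArg Prod.snd heq
        omega
      have hcomm := countP_mem_comm mp (xs.map (fun y => (min x y, max x y))) hmp hnodup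
      rw [List.countP_map] at hcomm
      refine (List.countP_congr (fun a _ => ?_)).trans
        (hcomm.trans (List.countP_congr (fun y _ => ?_))) <;> simp [Function.comp]
    rw [pairCount, key, ih hxs]
    push_cast
    ring

-- ===== VERDICT (by name: the statement is the Claim_ definition above) =====
theorem count_table_repeats_py_spec : Claim_equal_count_table_repeats_py := by
  intro t mp _hd hpre
  unfold Spec_count_table_repeats_py
  rw [A_eq_pairCount, pairCount_eq_alt t mp hpre.1 hpre.2]
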